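-- pv_equiv track=rewrite | github.com/hhhrrrttt222111/CodeChef | Medium/Sorting Vases (SORTVS)/Sorting_vases.py | is_simple_cycle
-- ===== SOURCE A (Python) =====
-- def dfs(s,nxt,used):
--     if used[s]:
--         return
--     used[s]=True
--     if nxt[s]:
--         dfs(nxt[s],nxt,used)
--
-- def is_simple_cycle(n,edge,k,edges):
--     cnt=[0]*(n+1)
--     used=[False]*(n+1)
--     nxt=[0]*(n+1)
--     for i in range (k):
--         if edge&(1<<i):
--             u=edges[i][0]
--             v=edges[i][1]
--             cnt[u]+=1
--             cnt[v]+=1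
--             nxt[u]=v
--     for i in range (1,n+1):
--         if cnt[i]!=0 and cnt[i]!=2: return False
--     for i in range (1,n+1):
--         if cnt[i]:
--             dfs(i,nxt,used)
--             break
--     for i in range (1,n+1):
--         if cnt[i] and (not used[i]):
--             return False
--     return True
-- ===== SOURCE B (Python) =====
-- def is_simple_cycle(n, edge, k, edges):
--     # staged pipeline: materialise the chosen edges once, then two separate
--     # passes build cnt and nxt; iterative while-walk instead of recursive dfs
--     chosen = [edges[i] for i in range(k) if edge & (1 << i)]
--     cnt = [0] * (n + 1)
--     for u, v in chosen:
--         cnt[u] += 1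
--         cnt[v] += 1
--     if any(c != 0 and c != 2 for c in cnt[1:]):
--         return False
--     nxt = [0] * (n + 1)
--     for u, v in chosen:
--         nxt[u] = v
--     used = [False] * (n + 1)
--     s = next((i for i in range(1, n + 1) if cnt[i]), 0)
--     while s and not used[s]:
--         used[s] = True
--         s = nxt[s]
--     return all(used[i] or not cnt[i] for i in range(1, n + 1))
-- ===== Notes on version B (the rewrite author's own statement) =====
-- stated objective: alternative
-- what changed: Restructures the fused selection loop into a staged pipeline (materialise the chosen edge list once, then separate passes for degree counts and for successor pointers), replaces the recursive dfs helper with an iterative while-walk, and the three early-return index loops with any()/all()/next() expressions.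
-- outside the precondition, e.g. on is_simple_cycle(1, 8, 3, [(1, 1)]): A returns True, B returns True
import Mathlib
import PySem

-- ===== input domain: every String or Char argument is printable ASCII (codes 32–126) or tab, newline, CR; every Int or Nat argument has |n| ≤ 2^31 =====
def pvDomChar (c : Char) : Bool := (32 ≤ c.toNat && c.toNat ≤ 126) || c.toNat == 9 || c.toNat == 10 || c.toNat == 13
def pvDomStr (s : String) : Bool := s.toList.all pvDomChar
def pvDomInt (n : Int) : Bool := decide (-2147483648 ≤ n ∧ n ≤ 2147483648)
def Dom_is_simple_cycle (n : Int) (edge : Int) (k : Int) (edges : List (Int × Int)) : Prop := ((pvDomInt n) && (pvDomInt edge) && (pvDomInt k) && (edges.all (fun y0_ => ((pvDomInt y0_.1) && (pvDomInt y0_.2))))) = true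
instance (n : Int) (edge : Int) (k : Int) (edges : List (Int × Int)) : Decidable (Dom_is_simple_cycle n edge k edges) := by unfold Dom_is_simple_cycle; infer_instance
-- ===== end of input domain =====

-- B restructures A's fused selection loop into a staged pipeline (the chosen edge list is
-- materialised once, then separate passes build cnt and nxt), replaces the recursive dfs by an
-- iterative while-walk, and the early-return index loops by any()/all()/next() (objective:
-- alternative; same return value, same asymptotic cost).

-- ===== PORT A =====
-- recursive dfs; fuel only makes the recursion total (Python terminates because each call
-- marks a new vertex, so fuel = used.length + 1 is never exhausted on admitted inputs)
def dfsA : Nat → Int → List Int → List Bool → List Bool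
  | 0, _, _, used => used
  | fuel+1, s, nxt, used =>
    match PySem.List.pyGet? used s with
    | none => used            -- Python IndexError here; excluded by Pre_
    | some true => used
    | some false =>
      let used' := PySem.List.pySetD used s true
      if PySem.List.pyGetD nxt s 0 ≠ 0 then dfsA fuel (PySem.List.pyGetD nxt s 0) nxt used'
      else used'

-- the body of A's edge-selection loop ('if edge&(1<<i): … cnt[u]+=1; cnt[v]+=1; nxt[u]=v')
def stepA (edge : Int) (edges : List (Int × Int)) (st : List Int × List Int) (i : Int) :
    List Int × List Int :=
  if PySem.Int.band edge ((1:Int) <<< i.toNat) ≠ 0 then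
    match PySem.List.pyGet? edges i with
    | none => st              -- Python IndexError here; excluded by Pre_
    | some uv =>
      let c1 := PySem.List.pySetD st.1 uv.1 (PySem.List.pyGetD st.1 uv.1 0 + 1)
      let c2 := PySem.List.pySetD c1 uv.2 (PySem.List.pyGetD c1 uv.2 0 + 1)
      (c2, PySem.List.pySetD st.2 uv.1 uv.2)
  else st

def is_simple_cycle (n : Int) (edge : Int) (k : Int) (edges : List (Int × Int)) : Bool :=
  let len := (n+1).toNat
  let st := (PySem.List.pyRange 0 k 1).foldl (stepA edge edges)
      (List.replicate len 0, List.replicate len 0)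
  let cnt := st.1
  let nxt := st.2
  if (PySem.List.pyRange 1 (n+1) 1).any
       (fun i => PySem.List.pyGetD cnt i 0 ≠ 0 && PySem.List.pyGetD cnt i 0 ≠ 2) then false
  else
    let used :=
      match (PySem.List.pyRange 1 (n+1) 1).find? (fun i => PySem.List.pyGetD cnt i 0 ≠ 0) with
      | some i => dfsA (len+1) i nxt (List.replicate len false)
      | none => List.replicate len false
    !((PySem.List.pyRange 1 (n+1) 1).any
        (fun i => PySem.List.pyGetD cnt i 0 ≠ 0 && !(PySem.List.pyGetD used i false)))

-- ===== PORT B =====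
-- B's bit test 'edge & (1 << i)' (truthy iff nonzero)
def selBit (edge : Int) (i : Int) : Bool := PySem.Int.band edge ((1:Int) <<< i.toNat) != 0

-- B's 'chosen = [edges[i] for i in range(k) if edge & (1 << i)]'
def chosenB (edge : Int) (k : Int) (edges : List (Int × Int)) : List (Int × Int) :=
  (PySem.List.pyRange 0 k 1).filterMap (fun i =>
    if selBit edge i
    then PySem.List.pyGet? edges i    -- none = Python IndexError; excluded by Pre_
    else none)

-- B's 'cnt[u] += 1; cnt[v] += 1' pass body
def cntStep (c : List Int) (uv : Int × Int) : List Int :=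
  let c1 := PySem.List.pySetD c uv.1 (PySem.List.pyGetD c uv.1 0 + 1)
  PySem.List.pySetD c1 uv.2 (PySem.List.pyGetD c1 uv.2 0 + 1)

-- B's 'nxt[u] = v' pass body
def nxtStep (x : List Int) (uv : Int × Int) : List Int :=
  PySem.List.pySetD x uv.1 uv.2

-- B's 'while s and not used[s]: used[s]=True; s=nxt[s]'; fuel only makes the loop total
-- (each pass marks a new vertex, so fuel = used.length + 1 is never exhausted)
def walkB : Nat → Int → List Int → List Bool → List Bool
  | 0, _, _, used => used
  | fuel+1, s, nxt, used =>
    if s ≠ 0 && !(PySem.List.pyGetD used s false) then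
      walkB fuel (PySem.List.pyGetD nxt s 0) nxt (PySem.List.pySetD used s true)
    else used

def is_simple_cycle_alt (n : Int) (edge : Int) (k : Int) (edges : List (Int × Int)) : Bool :=
  let chosen := chosenB edge k edges
  let cnt := chosen.foldl cntStep (List.replicate (n+1).toNat 0)
  if (PySem.List.slice cnt (some 1) none).any (fun c => c ≠ 0 && c ≠ 2) then false
  else
    let nxt := chosen.foldl nxtStep (List.replicate (n+1).toNat 0)
    let s0 :=
      match (PySem.List.pyRange 1 (n+1) 1).find? (fun i => PySem.List.pyGetD cnt i 0 ≠ 0) with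
      | some i => i
      | none => 0
    let used := walkB ((n+1).toNat+1) s0 nxt (List.replicate (n+1).toNat false)
    (PySem.List.pyRange 1 (n+1) 1).all
      (fun i => PySem.List.pyGetD used i false || PySem.List.pyGetD cnt i 0 == 0)

-- ===== PRECONDITION & SPEC =====
-- Pre_ is A's no-IndexError domain: every selected edge index is in range with endpoints in
-- Python's index range [-(n+1), n] of the size-(n+1) arrays; the only narrowing is that for
-- k > len(edges) it requires 0 ≤ edge < 2^len(edges) (a closed form guaranteeing no selected
-- bit at an out-of-range index) rather than 'no bit of edge set in [len(edges), k)'.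
def Pre_is_simple_cycle (n : Int) (edge : Int) (k : Int) (edges : List (Int × Int)) : Prop :=
  (k ≤ edges.length ∨ (0 ≤ edge ∧ edge < 2 ^ edges.length)) ∧
  ∀ i : Fin edges.length, ((i : Int) < k ∧ PySem.Int.band edge ((1:Int) <<< (i : Nat)) ≠ 0) →
    -(n+1) ≤ (edges.get i).1 ∧ (edges.get i).1 ≤ n ∧
    -(n+1) ≤ (edges.get i).2 ∧ (edges.get i).2 ≤ n
instance (n : Int) (edge : Int) (k : Int) (edges : List (Int × Int)) : Decidable (Pre_is_simple_cycle n edge k edges) := by unfold Pre_is_simple_cycle; infer_instance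

def pvWitness_is_simple_cycle : Int × Int × Int × (List (Int × Int)) := (3, 7, 3, [(1,2),(2,3),(3,1)])

def Spec_is_simple_cycle (n : Int) (edge : Int) (k : Int) (edges : List (Int × Int)) (out : Bool) : Prop := out = is_simple_cycle_alt n edge k edges
instance (n : Int) (edge : Int) (k : Int) (edges : List (Int × Int)) (out : Bool) : Decidable (Spec_is_simple_cycle n edge k edges out) := by unfold Spec_is_simple_cycle; infer_instance

-- ===== CLAIM (what is proved, stated in full; the proofs are below) =====
def Claim_equal_is_simple_cycle : Prop := ∀ (n : Int) (edge : Int) (k : Int) (edges : List (Int × Int)), Dom_is_simple_cycle n edge k edges → Pre_is_simple_cycle n edge k edges → Spec_is_simple_cycle n edge k edges (is_simple_cycle n edge k edges)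

-- ===== LEMMAS AND PROOFS =====

-- A's fused selection fold computes componentwise what B's two staged passes over the
-- materialised chosen list compute
lemma foldl_stepA_split (edge : Int) (edges : List (Int × Int)) :
    ∀ (is : List Int) (c x : List Int),
      is.foldl (stepA edge edges) (c, x) =
      ((is.filterMap (fun i => if selBit edge i then PySem.List.pyGet? edges i else none)).foldl
         cntStep c,
       (is.filterMap (fun i => if selBit edge i then PySem.List.pyGet? edges i else none)).foldl
         nxtStep x) := by
  intro is
  induction is with
  | nil => intro c x; rfl
  | cons i is' ih =>
    intro c x
    simp only [List.foldl_cons, List.filterMap_cons]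
    by_cases hbit : selBit edge i = true
    · have hband : PySem.Int.band edge ((1:Int) <<< i.toNat) ≠ 0 := by
        simpa [selBit] using hbit
      cases hg : PySem.List.pyGet? edges i with
      | none =>
        rw [show stepA edge edges (c, x) i = (c, x) by unfold stepA; rw [if_pos hband, hg]]
        rw [if_pos hbit]
        exact ih c x
      | some uv =>
        rw [show stepA edge edges (c, x) i = (cntStep c uv, nxtStep x uv) by
          unfold stepA cntStep nxtStep; rw [if_pos hband, hg]]
        rw [if_pos hbit]
        exact ih (cntStep c uv) (nxtStep x uv)
    · have hband : ¬ PySem.Int.band edge ((1:Int) <<< i.toNat) ≠ 0 := by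
        simpa [selBit] using hbit
      rw [show stepA edge edges (c, x) i = (c, x) by unfold stepA; rw [if_neg hband]]
      rw [if_neg hbit]
      exact ih c x

-- Python indexing at an in-range (possibly negative) index
lemma pyIdx_spec (L : Nat) (s : Int) (h0 : -(L:Int) ≤ s) (h1 : s < (L:Int)) :
    ∃ j : Nat, PySem.List.pyIdx? L s = some j ∧ j < L := by
  unfold PySem.List.pyIdx?
  by_cases hs : 0 ≤ s
  · exact ⟨s.toNat, by simp [hs, h1], by omega⟩
  · refine ⟨L - (-s).toNat, by simp [hs, h0], by omega⟩

lemma count_false_set (ul : List Bool) (j : Nat) (hj : j < ul.length)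
    (hf : ul[j] = false) :
    (ul.set j true).count false + 1 = ul.count false := by
  have hmem : false ∈ ul := hf ▸ List.getElem_mem hj
  have hpos : 0 < ul.count false := List.count_pos_iff.mpr hmem
  rw [List.count_set hj]
  simp [hf]
  omega

lemma mem_pySetD {α : Type} (xs : List α) (s : Int) (v : α) (x : α)
    (hx : x ∈ PySem.List.pySetD xs s v) : x ∈ xs ∨ x = v := by
  unfold PySem.List.pySetD PySem.List.pySet? at hx
  cases h : PySem.List.pyIdx? xs.length s with
  | none => rw [h] at hx; simp at hx; exact Or.inl hx
  | some j =>
    rw [h] at hx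
    simp at hx
    rcases List.mem_or_eq_of_mem_set hx with h2 | h2
    · exact Or.inl h2
    · exact Or.inr h2

-- the selection fold keeps both array lengths and keeps every nxt entry 0 or an
-- admitted endpoint
lemma fold_inv (n edge k : Int) (edges : List (Int × Int))
    (hsel : ∀ i : Fin edges.length, ((i : Int) < k ∧ PySem.Int.band edge ((1:Int) <<< (i : Nat)) ≠ 0) →
      -(n+1) ≤ (edges.get i).1 ∧ (edges.get i).1 ≤ n ∧
      -(n+1) ≤ (edges.get i).2 ∧ (edges.get i).2 ≤ n) :
    ∀ (is : List Int), (∀ i ∈ is, 0 ≤ i ∧ i < k) → ∀ (cl nl : List Int),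
      cl.length = (n+1).toNat → nl.length = (n+1).toNat →
      (∀ x ∈ nl, x = 0 ∨ (-(n+1) ≤ x ∧ x ≤ n)) →
      (is.foldl (stepA edge edges) (cl, nl)).1.length = (n+1).toNat ∧
      (is.foldl (stepA edge edges) (cl, nl)).2.length = (n+1).toNat ∧
      (∀ x ∈ (is.foldl (stepA edge edges) (cl, nl)).2, x = 0 ∨ (-(n+1) ≤ x ∧ x ≤ n)) := by
  intro is
  induction is with
  | nil => intro _ cl nl h1 h2 h3; exact ⟨h1, h2, h3⟩
  | cons i is' ih =>
    intro his cl nl h1 h2 h3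
    have hi := his i (List.mem_cons_self)
    have his' : ∀ j ∈ is', 0 ≤ j ∧ j < k := fun j hj => his j (List.mem_cons_of_mem i hj)
    simp only [List.foldl_cons]
    rcases hst : stepA edge edges (cl, nl) i with ⟨cl', nl'⟩
    have hprop : cl'.length = (n+1).toNat ∧ nl'.length = (n+1).toNat ∧
        (∀ x ∈ nl', x = 0 ∨ (-(n+1) ≤ x ∧ x ≤ n)) := by
      unfold stepA at hst
      by_cases hbit : PySem.Int.band edge ((1:Int) <<< i.toNat) ≠ 0
      · rw [if_pos hbit] at hst
        cases hg : PySem.List.pyGet? edges i with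
        | none => rw [hg] at hst; cases hst; exact ⟨h1, h2, h3⟩
        | some uv =>
          rw [hg] at hst
          have hil : i.toNat < edges.length := by
            by_contra hc
            have : PySem.List.pyIdx? edges.length i = none := by
              unfold PySem.List.pyIdx?
              simp [hi.1]
              omega
            unfold PySem.List.pyGet? at hg
            rw [this] at hg
            cases hg
          have huv : uv = edges.get ⟨i.toNat, hil⟩ := by
            unfold PySem.List.pyGet? PySem.List.pyIdx? at hg
            rw [if_pos hi.1, if_pos (by omega : i < (edges.length:Int))] at hg
            simp [List.getElem?_eq_getElem hil] at hg
            simpa [List.get_eq_getElem] using hg.symm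
          have hbnd := hsel ⟨i.toNat, hil⟩ ⟨by simpa using (by omega : (i.toNat : Int) < k),
            by simpa using hbit⟩
          rw [← huv] at hbnd
          cases hst
          refine ⟨by simp [PySem.List.length_pySetD, h1], by simp [PySem.List.length_pySetD, h2], ?_⟩
          intro x hx
          rcases mem_pySetD _ _ _ _ hx with hxm | hxe
          · exact h3 x hxm
          · exact Or.inr ⟨hxe ▸ hbnd.2.2.1, hxe ▸ hbnd.2.2.2⟩
      · rw [if_neg hbit] at hst
        cases hst
        exact ⟨h1, h2, h3⟩
    exact hprop.1 ▸ ih his' cl' nl' hprop.1 hprop.2.1 hprop.2.2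

-- the recursive dfs and the iterative walk mark exactly the same vertices
lemma walk_eq (n : Int) (hn : 1 ≤ n) (nxt : List Int) (hnl : nxt.length = (n+1).toNat)
    (hbnd : ∀ x ∈ nxt, x = 0 ∨ (-(n+1) ≤ x ∧ x ≤ n)) :
    ∀ (f : Nat) (s : Int) (used : List Bool), used.length = (n+1).toNat →
      used.count false < f → s ≠ 0 → -(n+1) ≤ s → s ≤ n →
      dfsA f s nxt used = walkB f s nxt used := by
  intro f
  induction f with
  | zero => intro s used _ hcnt; omega
  | succ f ih =>
    intro s used hul hcnt hs0 hsl hsr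
    obtain ⟨j, hj1, hj2⟩ := pyIdx_spec used.length s (by rw [hul]; omega)
      (by rw [hul]; omega)
    have hj1' : PySem.List.pyIdx? nxt.length s = some j := by rw [hnl, ← hul]; exact hj1
    have hg : PySem.List.pyGet? used s = some used[j] := by
      unfold PySem.List.pyGet?
      rw [hj1]
      simp [List.getElem?_eq_getElem hj2]
    have hgd : PySem.List.pyGetD used s false = used[j] := by
      unfold PySem.List.pyGetD
      rw [hg]
      rfl
    have hsetd : PySem.List.pySetD used s true = used.set j true := by
      unfold PySem.List.pySetD PySem.List.pySet?
      rw [hj1]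
      rfl
    have hnj : PySem.List.pyGetD nxt s 0 = nxt[j]'(by omega) := by
      unfold PySem.List.pyGetD PySem.List.pyGet?
      rw [hj1']
      simp [List.getElem?_eq_getElem (show j < nxt.length by omega)]
    by_cases hu : used[j] = true
    · rw [show dfsA (f+1) s nxt used = used by simp only [dfsA, hg, hu]]
      rw [show walkB (f+1) s nxt used = used by simp only [walkB, hgd, hu]; simp]
    · have huf : used[j] = false := by simpa using hu
      have hcond : (decide (s ≠ 0) && !PySem.List.pyGetD used s false) = true := by
        simp [hgd, huf, hs0]
      have hwB : walkB (f+1) s nxt used =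
          walkB f (PySem.List.pyGetD nxt s 0) nxt (PySem.List.pySetD used s true) := by
        simp only [walkB, hcond, if_true]
      have hcnt' : (used.set j true).count false < f := by
        have := count_false_set used j hj2 huf
        omega
      have hdfs : dfsA (f+1) s nxt used =
          (if PySem.List.pyGetD nxt s 0 ≠ 0 then
            dfsA f (PySem.List.pyGetD nxt s 0) nxt (PySem.List.pySetD used s true)
          else PySem.List.pySetD used s true) := by
        simp only [dfsA, hg, huf]
      by_cases hz : PySem.List.pyGetD nxt s 0 = 0
      · rw [hdfs, if_neg (by simp [hz]), hwB, hz]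
        obtain ⟨g, rfl⟩ : ∃ g, f = g + 1 := ⟨f - 1, by omega⟩
        rw [show walkB (g+1) 0 nxt (PySem.List.pySetD used s true) =
            PySem.List.pySetD used s true by simp [walkB]]
      · rw [hdfs, if_pos hz, hwB]
        have hmem : nxt[j]'(by omega) ∈ nxt := List.getElem_mem (by omega)
        have hb := hbnd _ hmem
        rw [hnj] at hz ⊢
        rcases hb with hb | hb
        · exact absurd hb hz
        · rw [hsetd]
          exact ih nxt[j] (used.set j true) (by simpa using hul) hcnt' hz hb.1 hb.2

-- 'any over cnt[1:]' is 'any over the values at indices 1..len-1'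
lemma any_drop_one {α : Type} (xs : List α) (p : α → Bool) (d : α) :
    (xs.drop 1).any p = (PySem.List.pyRange 1 (xs.length:Int) 1).any
      (fun i => p (PySem.List.pyGetD xs i d)) := by
  rw [Bool.eq_iff_iff, List.any_eq_true, List.any_eq_true]
  constructor
  · rintro ⟨a, ha, hp⟩
    obtain ⟨j, hj, hja⟩ := List.mem_iff_getElem.mp ha
    have hjl : 1 + j < xs.length := by
      have := List.length_drop (l := xs) (i := 1)
      omega
    refine ⟨((1 + j : Nat) : Int), PySem.List.mem_pyRange_one.mpr ⟨by omega, by omega⟩, ?_⟩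
    have : PySem.List.pyGetD xs ((1 + j : Nat) : Int) d = xs[1 + j] := by
      rw [PySem.List.pyGetD_eq_getElem xs d (by omega) (by omega)]
      simp only [Int.toNat_natCast]
    rw [this, show xs[1+j] = (xs.drop 1)[j] by rw [List.getElem_drop], hja]
    exact hp
  · rintro ⟨i, hi, hp⟩
    obtain ⟨hi1, hi2⟩ := PySem.List.mem_pyRange_one.mp hi
    have hil : i.toNat < xs.length := by omega
    rw [PySem.List.pyGetD_eq_getElem xs d (by omega) (by omega)] at hp
    refine ⟨xs[i.toNat], ?_, hp⟩
    rw [List.mem_iff_getElem]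
    refine ⟨i.toNat - 1, by have := List.length_drop (l := xs) (i := 1); omega, ?_⟩
    rw [List.getElem_drop]
    congr 1
    omega

theorem is_simple_cycle_spec : Claim_equal_is_simple_cycle := by
  intro n edge k edges _hDom hPre
  obtain ⟨_hk, hsel⟩ := hPre
  unfold Spec_is_simple_cycle
  simp only [is_simple_cycle, is_simple_cycle_alt]
  set st := List.foldl (stepA edge edges)
      (List.replicate (n+1).toNat 0, List.replicate (n+1).toNat 0)
      (PySem.List.pyRange 0 k) with hst
  -- A's fused fold = B's two staged passes over the chosen list
  have hsplit := foldl_stepA_split edge edges (PySem.List.pyRange 0 k)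
      (List.replicate (n+1).toNat 0) (List.replicate (n+1).toNat 0)
  have hcnt_eq : st.1 = (chosenB edge k edges).foldl cntStep (List.replicate (n+1).toNat 0) := by
    rw [hst, hsplit]; rfl
  have hnxt_eq : st.2 = (chosenB edge k edges).foldl nxtStep (List.replicate (n+1).toNat 0) := by
    rw [hst, hsplit]; rfl
  obtain ⟨hcl, hnl, hbnd⟩ := fold_inv n edge k edges hsel (PySem.List.pyRange 0 k)
    (fun i hi => PySem.List.mem_pyRange_one.mp hi) (List.replicate (n+1).toNat 0)
    (List.replicate (n+1).toNat 0) (by simp) (by simp)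
    (fun x hx => Or.inl (List.eq_of_mem_replicate hx))
  rw [← hcnt_eq, ← hnxt_eq]
  -- the two degree checks agree
  have hslice : PySem.List.slice st.1 (some 1) none = st.1.drop 1 := by
    rw [PySem.List.slice_from_one st.1, ← List.drop_one]
  have hcond : ((PySem.List.pyRange 1 (n+1)).any fun i =>
        decide (PySem.List.pyGetD st.1 i 0 ≠ 0) && decide (PySem.List.pyGetD st.1 i 0 ≠ 2)) =
      ((PySem.List.slice st.1 (some 1) none).any fun c => decide (c ≠ 0) && decide (c ≠ 2)) := by
    rw [hslice, any_drop_one st.1 _ 0, hcl]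
    by_cases hn0 : 0 ≤ n + 1
    · rw [Int.toNat_of_nonneg hn0]
    · have e1 : PySem.List.pyRange 1 (n+1) = [] :=
        List.eq_nil_iff_forall_not_mem.mpr
          (fun x hx => by have := PySem.List.mem_pyRange_one.mp hx; omega)
      have e2 : PySem.List.pyRange 1 (((n+1).toNat : Int)) = [] :=
        List.eq_nil_iff_forall_not_mem.mpr
          (fun x hx => by have := PySem.List.mem_pyRange_one.mp hx; omega)
      rw [e1, e2]
  rw [hcond]
  by_cases hdeg : ((PySem.List.slice st.1 (some 1) none).any fun c =>
      decide (c ≠ 0) && decide (c ≠ 2)) = true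
  · rw [if_pos hdeg, if_pos hdeg]
  · rw [if_neg hdeg, if_neg hdeg]
    -- the same find? picks the same start; then the walks agree
    have hused : (match (PySem.List.pyRange 1 (n+1)).find?
          (fun i => decide (PySem.List.pyGetD st.1 i 0 ≠ 0)) with
        | some i => dfsA ((n+1).toNat+1) i st.2 (List.replicate (n+1).toNat false)
        | none => List.replicate (n+1).toNat false) =
        walkB ((n+1).toNat+1)
          (match (PySem.List.pyRange 1 (n+1)).find?
            (fun i => decide (PySem.List.pyGetD st.1 i 0 ≠ 0)) with
          | some i => i
          | none => 0) st.2 (List.replicate (n+1).toNat false) := by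
      cases hf : (PySem.List.pyRange 1 (n+1)).find?
          (fun i => decide (PySem.List.pyGetD st.1 i 0 ≠ 0)) with
      | none =>
        rw [show walkB ((n+1).toNat+1) 0 st.2 (List.replicate (n+1).toNat false) =
            List.replicate (n+1).toNat false by simp only [walkB]; simp]
      | some m =>
        have hmem : m ∈ PySem.List.pyRange 1 (n+1) := List.mem_of_find?_eq_some hf
        obtain ⟨hm1, hm2⟩ := PySem.List.mem_pyRange_one.mp hmem
        exact walk_eq n (by omega) st.2 hnl hbnd ((n+1).toNat+1) m
          (List.replicate (n+1).toNat false) (by simp)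
          (by simp) (by omega) (by omega) (by omega)
    rw [hused]
    -- '!any(bad)' is 'all(good)'
    rw [Bool.eq_iff_iff, Bool.not_eq_true', List.any_eq_false, List.all_eq_true]
    constructor
    · intro h i hi
      have h2 := Bool.and_eq_false_iff.mp (Bool.eq_false_iff.mpr (h i hi))
      rw [Bool.or_eq_true_iff]
      rcases h2 with h2 | h2
      · right
        simp only [decide_eq_false_iff_not, Decidable.not_not] at h2
        rw [h2]
        rfl
      · left
        simp only [Bool.not_eq_false'] at h2
        exact h2
    · intro h i hi
      rw [Bool.not_eq_true]
      rcases Bool.or_eq_true_iff.mp (h i hi) with h2 | h2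
      · refine Bool.and_eq_false_iff.mpr (Or.inr ?_)
        simpa using h2
      · refine Bool.and_eq_false_iff.mpr (Or.inl ?_)
        simp only [beq_iff_eq] at h2
        simp [h2]
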